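-- pv_equiv track=rewrite | github.com/Dylan-Shorten/sugg_bot | src/sb_bot.py | __echo
-- ===== SOURCE A (Python) =====
-- def __echo(opts, args):
--     '''echo command'''
--     if len(args) != 1:
--         return 'echo cannot take ' + str(len(args)) + ' args'
--     string = args[0]
--     for opt in opts:
--         if opt[0] == '-l':
--             string = string.lower()
--         elif opt[0] == '-u':
--             string = string.upper()
--     return string
-- ===== SOURCE B (Python) =====
-- def __echo(opts, args):
--     '''echo command: first reduce the flags to a single decisive mode, then apply it once'''
--     if len(args) != 1:
--         return 'echo cannot take ' + str(len(args)) + ' args'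
--     mode = None
--     for opt in opts:
--         head = opt[0]
--         if head == '-l' or head == '-u':
--             mode = head
--     if mode == '-l':
--         return args[0].lower()
--     if mode == '-u':
--         return args[0].upper()
--     return args[0]
-- ===== Notes on version B (the rewrite author's own statement) =====
-- stated objective: alternative
-- what changed: B folds the options into a single mode accumulator (the last -l/-u flag seen) and applies exactly one case transform at the end, instead of A's fold that rewrites the string at every flag; correct because lower/upper rewrite the whole string so only the last flag matters.
import Mathlib
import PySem

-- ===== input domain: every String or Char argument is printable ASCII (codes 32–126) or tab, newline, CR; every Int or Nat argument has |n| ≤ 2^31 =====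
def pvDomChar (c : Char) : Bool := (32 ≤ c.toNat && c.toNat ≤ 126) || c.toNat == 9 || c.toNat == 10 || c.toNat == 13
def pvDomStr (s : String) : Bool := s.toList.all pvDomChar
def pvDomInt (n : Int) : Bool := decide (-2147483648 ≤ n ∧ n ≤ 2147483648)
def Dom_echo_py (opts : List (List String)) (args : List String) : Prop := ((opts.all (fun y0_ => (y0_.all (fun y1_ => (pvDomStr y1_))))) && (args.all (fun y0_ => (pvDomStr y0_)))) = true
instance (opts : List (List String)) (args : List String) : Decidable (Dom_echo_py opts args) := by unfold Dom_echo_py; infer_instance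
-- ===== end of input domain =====

-- B reduces the flags to a single decisive mode (the last -l/-u seen) and applies one transform at the end.

-- ===== PORT A =====
-- A's loop body: each option rewrites the current string via lower/upper.
def echoPyStep (s : String) (opt : List String) : String :=
  if PySem.List.pyGet? opt 0 = some "-l" then PySem.Str.lower s
  else if PySem.List.pyGet? opt 0 = some "-u" then PySem.Str.upper s
  else s

def echo_py (opts : List (List String)) (args : List String) : String :=
  if args.length ≠ 1 then
    "echo cannot take " ++ PySem.Int.toStr (args.length : Int) ++ " args"
  else
    opts.foldl echoPyStep (args.headD "")

-- ===== PORT B =====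
-- B's loop: accumulate the decisive mode (last -l/-u flag), touching no string.
def echoAltMode (m : Option String) (opt : List String) : Option String :=
  let head := PySem.List.pyGet? opt 0
  if head = some "-l" ∨ head = some "-u" then head else m

def echo_py_alt (opts : List (List String)) (args : List String) : String :=
  if args.length ≠ 1 then
    "echo cannot take " ++ PySem.Int.toStr (args.length : Int) ++ " args"
  else
    match opts.foldl echoAltMode none with
    | some "-l" => PySem.Str.lower (args.headD "")
    | some "-u" => PySem.Str.upper (args.headD "")
    | _ => args.headD ""

-- ===== PRECONDITION & SPEC =====
-- Pre_ excludes exactly the inputs where A raises IndexError on opt[0]: an empty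
-- option list while the loop runs (the loop is only reached when len(args) == 1).
def Pre_echo_py (opts : List (List String)) (args : List String) : Prop :=
  args.length = 1 → ∀ opt ∈ opts, opt ≠ []

instance (opts : List (List String)) (args : List String) : Decidable (Pre_echo_py opts args) := by
  unfold Pre_echo_py; infer_instance

def pvWitness_echo_py : List (List String) × List String := ([["-u"], ["-l"]], ["Hi"])

def Spec_echo_py (opts : List (List String)) (args : List String) (out : String) : Prop := out = echo_py_alt opts args
instance (opts : List (List String)) (args : List String) (out : String) : Decidable (Spec_echo_py opts args out) := by unfold Spec_echo_py; infer_instance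

-- ===== CLAIM (what is proved, stated in full; the proofs are below) =====
def Claim_equal_echo_py : Prop := ∀ (opts : List (List String)) (args : List String), Dom_echo_py opts args → Pre_echo_py opts args → Spec_echo_py opts args (echo_py opts args)

-- ===== LEMMAS AND PROOFS =====

theorem pv_toNat_ofNat (n : Nat) (h : n < 0xD800) : (Char.ofNat n).toNat = n := by
  unfold Char.ofNat
  split
  · rfl
  · next hv => exact absurd (Or.inl h) hv

theorem pv_isupper_iff (c : Char) : PySem.Chars.isupper c = true ↔ 65 ≤ c.toNat ∧ c.toNat ≤ 90 := by
  simp only [PySem.Chars.isupper, Bool.and_eq_true, decide_eq_true_eq, Char.le_def,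
    UInt32.le_iff_toNat_le, Char.toNat_val]
  rw [show 'A'.toNat = 65 from rfl, show 'Z'.toNat = 90 from rfl]

theorem pv_islower_iff (c : Char) : PySem.Chars.islower c = true ↔ 97 ≤ c.toNat ∧ c.toNat ≤ 122 := by
  simp only [PySem.Chars.islower, Bool.and_eq_true, decide_eq_true_eq, Char.le_def,
    UInt32.le_iff_toNat_le, Char.toNat_val]
  rw [show 'a'.toNat = 97 from rfl, show 'z'.toNat = 122 from rfl]

-- the case transforms absorb each other at the character level
theorem pv_lower_upper_char (c : Char) :
    PySem.Chars.lowerChar (PySem.Chars.upperChar c) = PySem.Chars.lowerChar c := by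
  by_cases hl : PySem.Chars.islower c = true
  · have hb := (pv_islower_iff c).mp hl
    have h1 : PySem.Chars.upperChar c = Char.ofNat (c.toNat - 32) := by
      simp [PySem.Chars.upperChar, hl]
    have ht : (Char.ofNat (c.toNat - 32)).toNat = c.toNat - 32 := pv_toNat_ofNat _ (by omega)
    have h2 : PySem.Chars.isupper (Char.ofNat (c.toNat - 32)) = true :=
      (pv_isupper_iff _).mpr (by omega)
    have h3 : ¬ PySem.Chars.isupper c = true := fun h => by
      have := (pv_isupper_iff c).mp h; omega
    rw [h1]
    simp only [PySem.Chars.lowerChar, h2, if_true, ht, if_neg h3]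
    rw [show c.toNat - 32 + 32 = c.toNat by omega, Char.ofNat_toNat]
  · simp [PySem.Chars.upperChar, hl]

theorem pv_upper_lower_char (c : Char) :
    PySem.Chars.upperChar (PySem.Chars.lowerChar c) = PySem.Chars.upperChar c := by
  by_cases hu : PySem.Chars.isupper c = true
  · have hb := (pv_isupper_iff c).mp hu
    have h1 : PySem.Chars.lowerChar c = Char.ofNat (c.toNat + 32) := by
      simp [PySem.Chars.lowerChar, hu]
    have ht : (Char.ofNat (c.toNat + 32)).toNat = c.toNat + 32 := pv_toNat_ofNat _ (by omega)
    have h2 : PySem.Chars.islower (Char.ofNat (c.toNat + 32)) = true :=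
      (pv_islower_iff _).mpr (by omega)
    have h3 : ¬ PySem.Chars.islower c = true := fun h => by
      have := (pv_islower_iff c).mp h; omega
    rw [h1]
    simp only [PySem.Chars.upperChar, h2, if_true, ht, if_neg h3]
    rw [show c.toNat + 32 - 32 = c.toNat by omega, Char.ofNat_toNat]
  · simp [PySem.Chars.lowerChar, hu]

theorem pv_lower_lower_char (c : Char) :
    PySem.Chars.lowerChar (PySem.Chars.lowerChar c) = PySem.Chars.lowerChar c := by
  by_cases hu : PySem.Chars.isupper c = true
  · have hb := (pv_isupper_iff c).mp hu
    have h1 : PySem.Chars.lowerChar c = Char.ofNat (c.toNat + 32) := by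
      simp [PySem.Chars.lowerChar, hu]
    have ht : (Char.ofNat (c.toNat + 32)).toNat = c.toNat + 32 := pv_toNat_ofNat _ (by omega)
    have h2 : ¬ PySem.Chars.isupper (Char.ofNat (c.toNat + 32)) = true := fun h => by
      have := (pv_isupper_iff _).mp h; omega
    rw [h1]
    simp only [PySem.Chars.lowerChar, if_neg h2]
  · simp [PySem.Chars.lowerChar, hu]

theorem pv_upper_upper_char (c : Char) :
    PySem.Chars.upperChar (PySem.Chars.upperChar c) = PySem.Chars.upperChar c := by
  by_cases hl : PySem.Chars.islower c = true
  · have hb := (pv_islower_iff c).mp hl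
    have h1 : PySem.Chars.upperChar c = Char.ofNat (c.toNat - 32) := by
      simp [PySem.Chars.upperChar, hl]
    have ht : (Char.ofNat (c.toNat - 32)).toNat = c.toNat - 32 := pv_toNat_ofNat _ (by omega)
    have h2 : ¬ PySem.Chars.islower (Char.ofNat (c.toNat - 32)) = true := fun h => by
      have := (pv_islower_iff _).mp h; omega
    rw [h1]
    simp only [PySem.Chars.upperChar, if_neg h2]
  · simp [PySem.Chars.upperChar, hl]

-- string-level absorption
theorem pv_lower_absorb (s : String) :
    PySem.Str.lower (PySem.Str.lower s) = PySem.Str.lower s := by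
  simp [PySem.Str.lower, PySem.Chars.lower, List.map_map, Function.comp_def,
    pv_lower_lower_char]

theorem pv_lower_upper (s : String) :
    PySem.Str.lower (PySem.Str.upper s) = PySem.Str.lower s := by
  simp [PySem.Str.lower, PySem.Str.upper, PySem.Chars.lower, PySem.Chars.upper,
    List.map_map, Function.comp_def, pv_lower_upper_char]

theorem pv_upper_absorb (s : String) :
    PySem.Str.upper (PySem.Str.upper s) = PySem.Str.upper s := by
  simp [PySem.Str.upper, PySem.Chars.upper, List.map_map, Function.comp_def,
    pv_upper_upper_char]

theorem pv_upper_lower (s : String) :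
    PySem.Str.upper (PySem.Str.lower s) = PySem.Str.upper s := by
  simp [PySem.Str.lower, PySem.Str.upper, PySem.Chars.lower, PySem.Chars.upper,
    List.map_map, Function.comp_def, pv_upper_lower_char]

-- lower/upper of A's fold is fixed by the start string
theorem pv_lower_foldl (opts : List (List String)) (s0 : String) :
    PySem.Str.lower (opts.foldl echoPyStep s0) = PySem.Str.lower s0 := by
  induction opts generalizing s0 with
  | nil => rfl
  | cons opt rest ih =>
    simp only [List.foldl_cons]
    rw [ih]
    unfold echoPyStep
    split_ifs
    · exact pv_lower_absorb s0
    · exact pv_lower_upper s0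
    · rfl

theorem pv_upper_foldl (opts : List (List String)) (s0 : String) :
    PySem.Str.upper (opts.foldl echoPyStep s0) = PySem.Str.upper s0 := by
  induction opts generalizing s0 with
  | nil => rfl
  | cons opt rest ih =>
    simp only [List.foldl_cons]
    rw [ih]
    unfold echoPyStep
    split_ifs
    · exact pv_upper_lower s0
    · exact pv_upper_absorb s0
    · rfl

-- dispatch of B's final match, as a function of the accumulated mode
def pvApplyMode (m : Option String) (s : String) : String :=
  match m with
  | some "-l" => PySem.Str.lower s
  | some "-u" => PySem.Str.upper s
  | _ => s

-- main loop equivalence: A's string fold = applying B's accumulated mode once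
theorem pv_fold_eq_mode (opts : List (List String)) (s0 : String) :
    opts.foldl echoPyStep s0 = pvApplyMode (opts.foldl echoAltMode none) s0 := by
  induction opts using List.reverseRecOn with
  | nil => rfl
  | append_singleton ys y ih =>
    rw [List.foldl_append, List.foldl_append]
    simp only [List.foldl_cons, List.foldl_nil]
    by_cases hl : PySem.List.pyGet? y 0 = some "-l"
    · rw [show echoPyStep (ys.foldl echoPyStep s0) y
            = PySem.Str.lower (ys.foldl echoPyStep s0) by simp [echoPyStep, hl],
          show echoAltMode (ys.foldl echoAltMode none) y = some "-l" by
            simp [echoAltMode, hl],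
          pv_lower_foldl]
      rfl
    · by_cases hu : PySem.List.pyGet? y 0 = some "-u"
      · rw [show echoPyStep (ys.foldl echoPyStep s0) y
              = PySem.Str.upper (ys.foldl echoPyStep s0) by simp [echoPyStep, hu],
            show echoAltMode (ys.foldl echoAltMode none) y = some "-u" by
              simp [echoAltMode, hu],
            pv_upper_foldl]
        rfl
      · rw [show echoPyStep (ys.foldl echoPyStep s0) y = ys.foldl echoPyStep s0 by
              simp [echoPyStep, hl, hu],
            show echoAltMode (ys.foldl echoAltMode none) y = ys.foldl echoAltMode none by
              simp [echoAltMode, hl, hu],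
            ih]

-- ===== VERDICT (by name: the statement is the Claim_ definition above) =====
theorem echo_py_spec : Claim_equal_echo_py := by
  intro opts args _ _
  unfold Spec_echo_py echo_py echo_py_alt
  split
  · rfl
  · rw [pv_fold_eq_mode]
    unfold pvApplyMode
    rfl
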